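-- pv_equiv track=rewrite | github.com/hyl-19/Portfolio | 大三下/演算法分析 Analysis of Algorithms/HW1/Connected Component Labeling.py | dfs
-- ===== SOURCE A (Python) =====
-- def dfs(matrix, x, y, visited):
--     # 四個參數 matrix是二維矩陣 x和y是開始搜索的點的坐標 visited用於記錄是否被訪問過。
--     directions = [(-1, 0), (1, 0), (0, -1), (0, 1), (-1, -1),
--                   (-1, 1), (1, -1), (1, 1)]  # 全部方向無死角
--     stack = [(x, y)]
--     area = 0  # 初始化
--     while stack:  # 只要有訪問到就會繼續
--         cx, cy = stack.pop()  # 後進先出 (因為使用的是DFS)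
--         if visited[cx][cy]:  # 訪問過就跳過
--             continue
--         visited[cx][cy] = True  # 紀錄是否訪問過
--         area += 1  # 增加他的area
--         for dx, dy in directions:  # 無死角搜索
--             nx, ny = cx + dx, cy + dy
--             if 0 <= nx < len(matrix) and 0 <= ny < len(matrix[0]) and matrix[nx][ny] == 1 and not visited[nx][ny]:
--                 stack.append((nx, ny))
--     return area
-- ===== SOURCE B (Python) =====
-- def dfs(matrix, x, y, visited):
--     # BFS flood fill: scan a growing queue with a read index (FIFO) instead of
--     # popping a LIFO stack; the set of cells marked (and hence the area) is the
--     # same because the marked closure is independent of traversal order.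
--     # Like the original, this mutates `visited` in place (same final state).
--     rows = len(matrix)
--     queue = [(x, y)]
--     area = 0
--     i = 0
--     while i < len(queue):
--         cx, cy = queue[i]
--         i += 1
--         if visited[cx][cy]:
--             continue
--         visited[cx][cy] = True
--         area += 1
--         cols = len(matrix[0])
--         for dx, dy in ((-1, -1), (-1, 0), (-1, 1), (0, -1), (0, 1), (1, -1), (1, 0), (1, 1)):
--             nx, ny = cx + dx, cy + dy
--             if 0 <= nx < rows and 0 <= ny < cols and matrix[nx][ny] == 1 and not visited[nx][ny]:
--                 queue.append((nx, ny))
--     return area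
-- ===== Notes on version B (the rewrite author's own statement) =====
-- stated objective: alternative
-- what changed: Replaces A's DFS (LIFO stack, pop from the end, A's direction order) by a BFS flood fill that scans a growing queue with a read index (FIFO, row-major neighbour order); the marked closure, and hence the area, is independent of traversal order.
-- outside the precondition, e.g. on dfs([], 0, 0, [[False]]): A returns 1, B raises IndexError; on dfs([[0, 0], [0, 0, 1]], 0, 0, [[False, False], [False, False]]): A returns 1, B returns 1; on dfs([[1]], 0, 0, [[False, False]]): A returns 1, B returns 1
import Mathlib
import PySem

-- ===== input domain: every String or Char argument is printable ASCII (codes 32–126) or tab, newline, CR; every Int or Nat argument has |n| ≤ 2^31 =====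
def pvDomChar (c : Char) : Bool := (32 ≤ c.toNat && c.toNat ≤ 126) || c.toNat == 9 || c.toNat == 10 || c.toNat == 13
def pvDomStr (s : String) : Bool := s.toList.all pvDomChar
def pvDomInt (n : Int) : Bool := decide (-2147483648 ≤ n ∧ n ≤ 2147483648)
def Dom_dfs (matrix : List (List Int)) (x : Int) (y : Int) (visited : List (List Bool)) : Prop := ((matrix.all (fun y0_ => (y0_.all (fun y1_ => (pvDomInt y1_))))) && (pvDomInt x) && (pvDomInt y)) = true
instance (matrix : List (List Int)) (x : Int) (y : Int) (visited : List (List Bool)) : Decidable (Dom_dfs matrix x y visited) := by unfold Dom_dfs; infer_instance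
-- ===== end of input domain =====

-- B replaces A's LIFO-stack DFS by a FIFO queue scan (BFS, different neighbour order):
-- an 'alternative' of the same cost; the equivalence is about the RETURN value — both
-- Pythons mutate `visited` in place (they leave it in the same final state).

-- 2D Python indexing, shared primitive semantics: v[i][j] (negative wrap, none = IndexError)
def pget2? {α : Type} (v : List (List α)) (i j : Int) : Option α :=
  (PySem.List.pyGet? v i).bind (fun r => PySem.List.pyGet? r j)

-- v[i][j] = c (in-place row update; on an index Python rejects it leaves v unchanged — A raises there, outside Pre_)
def pset2 (v : List (List Bool)) (i j : Int) (c : Bool) : List (List Bool) :=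
  match PySem.List.pyGet? v i with
  | none => v
  | some r => PySem.List.pySetD v i (PySem.List.pySetD r j c)

-- number of False entries of `visited` (fuel bound for the loops; a pure totality device)
def tf (v : List (List Bool)) : Nat := (v.map (fun r => r.countP (fun c => !c))).sum

-- ===== PORT A =====
def dirsA : List (Int × Int) := [(-1, 0), (1, 0), (0, -1), (0, 1), (-1, -1), (-1, 1), (1, -1), (1, 1)]

-- A's push condition; `matrix[nx][ny]` / `visited[nx][ny]` raise only on ragged rows (outside Pre_): defaults 0 / true make the guard false there
def dfsGuard (m : List (List Int)) (v : List (List Bool)) (n : Int × Int) : Bool :=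
  decide (0 ≤ n.1) && decide (n.1 < (m.length : Int)) && decide (0 ≤ n.2) && decide (n.2 < ((m.headD []).length : Int))
    && ((pget2? m n.1 n.2).getD 0 == 1) && !((pget2? v n.1 n.2).getD true)

-- the eight `stack.append` calls of one iteration, in A's direction order
def dfsPushes (m : List (List Int)) (v : List (List Bool)) (c : Int × Int) : List (Int × Int) :=
  dirsA.foldl (fun acc d => if dfsGuard m v (c.1 + d.1, c.2 + d.2) then acc ++ [(c.1 + d.1, c.2 + d.2)] else acc) []

-- A's while-loop; list head = top of the stack, so pushes go reversed onto the front.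
-- Returns (area, final visited); `none` = visited[cx][cy] raised IndexError (outside Pre_).
def dfsLoop (m : List (List Int)) : Nat → List (Int × Int) → List (List Bool) → Int → Int × List (List Bool)
  | 0, _, v, a => (a, v)
  | _ + 1, [], v, a => (a, v)
  | f + 1, c :: rest, v, a =>
    match pget2? v c.1 c.2 with
    | none => (a, v)
    | some true => dfsLoop m f rest v a
    | some false =>
      dfsLoop m f ((dfsPushes m (pset2 v c.1 c.2 true) c).reverse ++ rest) (pset2 v c.1 c.2 true) (a + 1)

def dfs (matrix : List (List Int)) (x : Int) (y : Int) (visited : List (List Bool)) : Int :=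
  (dfsLoop matrix (9 * tf visited + 2) [(x, y)] visited 0).1

-- ===== PORT B =====
def dirsB : List (Int × Int) := [(-1, -1), (-1, 0), (-1, 1), (0, -1), (0, 1), (1, -1), (1, 0), (1, 1)]

def altGuard (m : List (List Int)) (v : List (List Bool)) (n : Int × Int) : Bool :=
  decide (0 ≤ n.1) && decide (n.1 < (m.length : Int)) && decide (0 ≤ n.2) && decide (n.2 < ((m.headD []).length : Int))
    && ((pget2? m n.1 n.2).getD 0 == 1) && !((pget2? v n.1 n.2).getD true)

-- B's while-loop: the queue only grows, `i` is the read index (FIFO scan)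
def altLoop (m : List (List Int)) : Nat → Nat → List (Int × Int) → List (List Bool) → Int → Int × List (List Bool)
  | 0, _, _, v, a => (a, v)
  | f + 1, i, q, v, a =>
    if h : i < q.length then
      let c := q[i]
      match pget2? v c.1 c.2 with
      | none => (a, v)
      | some true => altLoop m f (i + 1) q v a
      | some false =>
        altLoop m f (i + 1)
          (q ++ dirsB.foldl (fun acc d => if altGuard m (pset2 v c.1 c.2 true) (c.1 + d.1, c.2 + d.2) then acc ++ [(c.1 + d.1, c.2 + d.2)] else acc) [])
          (pset2 v c.1 c.2 true) (a + 1)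
    else (a, v)

def dfs_alt (matrix : List (List Int)) (x : Int) (y : Int) (visited : List (List Bool)) : Int :=
  (altLoop matrix (9 * tf visited + 2) 0 [(x, y)] visited 0).1

-- ===== PRECONDITION & SPEC =====
-- Pre_ is the natural domain of a flood fill: a nonempty rectangular matrix, `visited` of the
-- same shape, and a start index Python accepts (negative = wraparound).  It excludes inputs on
-- which A raises IndexError (out-of-range start, most ragged/mismatched shapes) and, with them,
-- some malformed-shape inputs on which A happens to return because its walk never reaches the
-- ragged part (see the cites in the claim).
def Pre_dfs (matrix : List (List Int)) (x : Int) (y : Int) (visited : List (List Bool)) : Prop :=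
  matrix ≠ [] ∧
  (∀ r ∈ matrix, r.length = (matrix.headD []).length) ∧
  visited.length = matrix.length ∧
  (∀ r ∈ visited, r.length = (matrix.headD []).length) ∧
  -(matrix.length : Int) ≤ x ∧ x < (matrix.length : Int) ∧
  -((matrix.headD []).length : Int) ≤ y ∧ y < ((matrix.headD []).length : Int)
instance (matrix : List (List Int)) (x : Int) (y : Int) (visited : List (List Bool)) : Decidable (Pre_dfs matrix x y visited) := by unfold Pre_dfs; infer_instance

def pvWitness_dfs : List (List Int) × Int × Int × List (List Bool) :=
  ([[1, 1], [1, 0]], 0, 0, [[false, false], [false, false]])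

def Spec_dfs (matrix : List (List Int)) (x : Int) (y : Int) (visited : List (List Bool)) (out : Int) : Prop := out = dfs_alt matrix x y visited
instance (matrix : List (List Int)) (x : Int) (y : Int) (visited : List (List Bool)) (out : Int) : Decidable (Spec_dfs matrix x y visited out) := by unfold Spec_dfs; infer_instance

-- ===== CLAIM (what is proved, stated in full; the proofs are below) =====
def Claim_equal_dfs : Prop := ∀ (matrix : List (List Int)) (x : Int) (y : Int) (visited : List (List Bool)), Dom_dfs matrix x y visited → Pre_dfs matrix x y visited → Spec_dfs matrix x y visited (dfs matrix x y visited)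

-- ===== LEMMAS AND PROOFS =====

-- ---- spec-side vocabulary: total 2D reads, shapes, the reachable set ----
def colsN (m : List (List Int)) : Nat := (m.headD []).length

def vget (v : List (List Bool)) (i j : Int) : Bool :=
  if 0 ≤ i ∧ 0 ≤ j then ((v.getD i.toNat []).getD j.toNat false) else false

def mget (m : List (List Int)) (i j : Int) : Int :=
  if 0 ≤ i ∧ 0 ≤ j then ((m.getD i.toNat []).getD j.toNat 0) else 0

def tt (v : List (List Bool)) : Nat := (v.map (fun r => r.countP (fun c => c))).sum

def inB (m : List (List Int)) (c : Int × Int) : Prop :=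
  0 ≤ c.1 ∧ c.1 < (m.length : Int) ∧ 0 ≤ c.2 ∧ c.2 < (colsN m : Int)

def elig (m : List (List Int)) (b : List (List Bool)) (c : Int × Int) : Prop :=
  inB m c ∧ mget m c.1 c.2 = 1 ∧ vget b c.1 c.2 = false

def adj (u w : Int × Int) : Prop := ∃ d ∈ dirsA, w = (u.1 + d.1, u.2 + d.2)

def shapeOK (m : List (List Int)) (v : List (List Bool)) : Prop :=
  v.length = m.length ∧ ∀ r ∈ v, r.length = colsN m

def rect (m : List (List Int)) : Prop := ∀ r ∈ m, r.length = colsN m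

-- cells reachable from the seed list S through 8-adjacent eligible (value-1, unblocked-in-b) cells
inductive Reach (m : List (List Int)) (b : List (List Bool)) (S : List (Int × Int)) : Int × Int → Prop
  | seed (c : Int × Int) (hc : c ∈ S) : Reach m b S c
  | step (u w : Int × Int) (hu : Reach m b S u) (ha : adj u w) (he : elig m b w) : Reach m b S w

def nrm (n : Nat) (i : Int) : Nat := (if i < 0 then i + n else i).toNat

-- ---- wrap-around index normalisation ----
lemma pyIdx_nrm (n : Nat) (i : Int) (h1 : -(n : Int) ≤ i) (h2 : i < n) :
    PySem.List.pyIdx? n i = some (nrm n i) := by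
  unfold PySem.List.pyIdx? nrm
  split_ifs <;> simp_all <;> omega

lemma nrm_lt (n : Nat) (i : Int) (h1 : -(n : Int) ≤ i) (h2 : i < n) : nrm n i < n := by
  unfold nrm; split_ifs <;> omega

lemma pyGet_nrm {α : Type} (xs : List α) (i : Int) (h1 : -(xs.length : Int) ≤ i) (h2 : i < xs.length) :
    PySem.List.pyGet? xs i = xs[nrm xs.length i]? := by
  simp [PySem.List.pyGet?, pyIdx_nrm _ _ h1 h2]

lemma pySetD_nrm {α : Type} (xs : List α) (i : Int) (v : α) (h1 : -(xs.length : Int) ≤ i) (h2 : i < xs.length) :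
    PySem.List.pySetD xs i v = xs.set (nrm xs.length i) v := by
  simp [PySem.List.pySetD, PySem.List.pySet?, pyIdx_nrm _ _ h1 h2]

-- ---- counting helpers ----
lemma countP_set_true (r : List Bool) (k : Nat) (hk : k < r.length) (hf : r[k] = false) :
    (r.set k true).countP (fun c => c) = r.countP (fun c => c) + 1 := by
  induction r generalizing k with
  | nil => simp at hk
  | cons h t ih =>
    cases k with
    | zero => simp_all
    | succ k =>
      have hk' : k < t.length := by simpa using hk
      have hf' : t[k] = false := by simpa using hf
      have := ih k hk' hf'
      simp [List.countP_cons, this]; omega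

lemma countP_set_false (r : List Bool) (k : Nat) (hk : k < r.length) (hf : r[k] = false) :
    (r.set k true).countP (fun c => !c) + 1 = r.countP (fun c => !c) := by
  induction r generalizing k with
  | nil => simp at hk
  | cons h t ih =>
    cases k with
    | zero => simp_all
    | succ k =>
      have hk' : k < t.length := by simpa using hk
      have hf' : t[k] = false := by simpa using hf
      have := ih k hk' hf'
      simp [List.countP_cons]; omega

lemma sum_map_set (f : List Bool → Nat) (v : List (List Bool)) (k : Nat) (hk : k < v.length) (r' : List Bool) :
    ((v.set k r').map f).sum + f (v[k]) = (v.map f).sum + f r' := by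
  induction v generalizing k with
  | nil => simp at hk
  | cons h t ih =>
    cases k with
    | zero => simp; omega
    | succ k =>
      have hk' : k < t.length := by simpa using hk
      have := ih k hk'
      simp only [List.set_cons_succ, List.map_cons, List.sum_cons, List.getElem_cons_succ]
      omega


-- ---- 2D read/write characterisations ----
lemma getD_eq_getElem' {α : Type} (l : List α) (d : α) {n : Nat} (h : n < l.length) :
    l.getD n d = l[n] := by
  rw [List.getD_eq_getElem?_getD, List.getElem?_eq_getElem h]; rfl

lemma getD_mem' {α : Type} (l : List α) (d : α) {n : Nat} (h : n < l.length) :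
    l.getD n d ∈ l := by
  rw [getD_eq_getElem' l d h]; exact List.getElem_mem h

lemma pget2_eq_nonneg {α : Type} (v : List (List α)) (d : α) (i j : Int)
    (hi : 0 ≤ i) (hilt : i < (v.length : Int)) (hj : 0 ≤ j) (hjlt : j < ((v.getD i.toNat []).length : Int)) :
    pget2? v i j = some ((v.getD i.toNat []).getD j.toNat d) := by
  have hilt' : i.toNat < v.length := by omega
  have hrow : v.getD i.toNat [] = v[i.toNat] := getD_eq_getElem' v [] hilt'
  have hjlt' : j.toNat < (v[i.toNat]).length := by rw [← hrow]; omega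
  simp only [pget2?]
  rw [PySem.List.pyGet?_of_nonneg v hi, List.getElem?_eq_getElem hilt']
  simp only [Option.bind_some]
  rw [PySem.List.pyGet?_of_nonneg _ hj, List.getElem?_eq_getElem hjlt']
  rw [hrow, getD_eq_getElem' _ _ hjlt']

lemma vget_eq_getD (v : List (List Bool)) (i j : Int) (hi : 0 ≤ i) (hj : 0 ≤ j) :
    vget v i j = (v.getD i.toNat []).getD j.toNat false := by
  simp [vget, hi, hj]

lemma mget_eq_getD (m : List (List Int)) (i j : Int) (hi : 0 ≤ i) (hj : 0 ≤ j) :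
    mget m i j = (m.getD i.toNat []).getD j.toNat 0 := by
  simp [mget, hi, hj]

-- visited read, in-range nonneg coordinates
lemma pget2_v (m : List (List Int)) (v : List (List Bool)) (hv : shapeOK m v) (c : Int × Int)
    (hc : inB m c) : pget2? v c.1 c.2 = some (vget v c.1 c.2) := by
  obtain ⟨h1, h2, h3, h4⟩ := hc
  obtain ⟨hl, hr⟩ := hv
  have hrowlen : (v.getD c.1.toNat []).length = colsN m := hr _ (getD_mem' v [] (by omega))
  rw [vget_eq_getD v _ _ h1 h3]
  exact pget2_eq_nonneg v false c.1 c.2 h1 (by omega) h3 (by omega)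

-- matrix read, in-range nonneg coordinates
lemma pget2_m (m : List (List Int)) (hm : rect m) (c : Int × Int)
    (hc : inB m c) : pget2? m c.1 c.2 = some (mget m c.1 c.2) := by
  obtain ⟨h1, h2, h3, h4⟩ := hc
  have hm0 : 0 < m.length := by omega
  have hrowlen : (m.getD c.1.toNat []).length = colsN m := hm _ (getD_mem' m [] (by omega))
  rw [mget_eq_getD m _ _ h1 h3]
  exact pget2_eq_nonneg m 0 c.1 c.2 h1 (by omega) h3 (by omega)

-- wrap-around visited read (used for the start cell)
lemma pget2_v_wrap (m : List (List Int)) (v : List (List Bool)) (hv : shapeOK m v) (x y : Int)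
    (hx1 : -(m.length : Int) ≤ x) (hx2 : x < (m.length : Int))
    (hy1 : -(colsN m : Int) ≤ y) (hy2 : y < (colsN m : Int)) :
    pget2? v x y = some (vget v (nrm m.length x : Nat) (nrm (colsN m) y : Nat)) := by
  obtain ⟨hl, hr⟩ := hv
  have hm0 : 0 < m.length := by omega
  have hxn := nrm_lt m.length x hx1 hx2
  have hyn := nrm_lt (colsN m) y hy1 hy2
  have hxv : nrm m.length x < v.length := by omega
  have hrow : v.getD (nrm m.length x) [] = v[nrm m.length x] := getD_eq_getElem' v [] hxv
  have hrowlen : (v.getD (nrm m.length x) []).length = colsN m := hr _ (getD_mem' v [] hxv)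
  simp only [pget2?]
  rw [pyGet_nrm v x (by omega) (by omega), hl, List.getElem?_eq_getElem hxv]
  simp only [Option.bind_some]
  rw [← hrow, pyGet_nrm _ y (by omega) (by omega), hrowlen]
  rw [List.getElem?_eq_getElem (by omega)]
  rw [vget_eq_getD _ _ _ (by positivity) (by positivity)]
  simp only [Int.toNat_natCast]
  simp only [hrow]
  rw [getD_eq_getElem' _ false (by rw [← hrow]; omega)]

-- wrap-around write: everything the proofs need about marking one cell
lemma pset2_char (m : List (List Int)) (v : List (List Bool)) (hv : shapeOK m v) (x y : Int)
    (hx1 : -(m.length : Int) ≤ x) (hx2 : x < (m.length : Int))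
    (hy1 : -(colsN m : Int) ≤ y) (hy2 : y < (colsN m : Int))
    (hfalse : vget v (nrm m.length x : Nat) (nrm (colsN m) y : Nat) = false) :
    shapeOK m (pset2 v x y true) ∧
    (∀ i j : Int, vget (pset2 v x y true) i j =
        (if i = (nrm m.length x : Nat) ∧ j = (nrm (colsN m) y : Nat) then true else vget v i j)) ∧
    tt (pset2 v x y true) = tt v + 1 ∧
    tf (pset2 v x y true) + 1 = tf v := by
  obtain ⟨hl, hr⟩ := hv
  have hm0 : 0 < m.length := by omega
  set xn := nrm m.length x with hxn'
  set yn := nrm (colsN m) y with hyn'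
  have hxn := nrm_lt m.length x hx1 hx2
  have hyn := nrm_lt (colsN m) y hy1 hy2
  have hxv : xn < v.length := by omega
  have hrow : v.getD xn [] = v[xn] := getD_eq_getElem' v [] hxv
  have hrowlen : (v[xn]).length = colsN m := by rw [← hrow]; exact hr _ (getD_mem' v [] hxv)
  have h1 : PySem.List.pyGet? v x = some v[xn] := by
    rw [pyGet_nrm v x (by omega) (by omega), hl]
    exact List.getElem?_eq_getElem hxv
  have hset : pset2 v x y true = v.set xn ((v[xn]).set yn true) := by
    simp only [pset2, h1]
    rw [pySetD_nrm _ y _ (by omega) (by omega), hrowlen]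
    rw [pySetD_nrm _ x _ (by omega) (by omega), hl]
  have hcell : (v[xn])[yn]'(by omega) = false := by
    rw [vget_eq_getD v _ _ (by positivity) (by positivity)] at hfalse
    simp only [Int.toNat_natCast] at hfalse
    rw [hrow, getD_eq_getElem' _ false (by omega)] at hfalse
    exact hfalse
  rw [hset]
  refine ⟨⟨by simpa using hl, ?_⟩, ?_, ?_, ?_⟩
  · intro r hrm
    rcases List.mem_or_eq_of_mem_set hrm with h | h
    · exact hr r h
    · rw [h]; simpa using hrowlen
  · intro i j
    by_cases hij : i = (xn : Int) ∧ j = (yn : Int)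
    · obtain ⟨hi, hj⟩ := hij
      subst hi; subst hj
      rw [if_pos ⟨rfl, rfl⟩]
      rw [vget_eq_getD _ _ _ (by positivity) (by positivity)]
      simp only [Int.toNat_natCast]
      rw [getD_eq_getElem' _ [] (by simpa using hxv), List.getElem_set_self (by simp; omega)]
      rw [getD_eq_getElem' _ false (by simpa [hrowlen] using hyn), List.getElem_set_self (by simp; omega)]
    · rw [if_neg hij]
      by_cases hnn : 0 ≤ i ∧ 0 ≤ j
      · obtain ⟨hi, hj⟩ := hnn
        rw [vget_eq_getD _ _ _ hi hj, vget_eq_getD _ _ _ hi hj]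
        by_cases hieq : i.toNat = xn
        · have hjne : j.toNat ≠ yn := fun hje => hij ⟨by omega, by omega⟩
          rw [hieq]
          rw [getD_eq_getElem' _ [] (by simpa using hxv), List.getElem_set_self (by simp; omega), hrow]
          rw [List.getD_eq_getElem?_getD, List.getD_eq_getElem?_getD, List.getElem?_set_ne (by omega)]
        · have : (v.set xn ((v[xn]).set yn true)).getD i.toNat [] = v.getD i.toNat [] := by
            rw [List.getD_eq_getElem?_getD, List.getD_eq_getElem?_getD, List.getElem?_set_ne (by omega)]
          rw [this]
      · rw [vget, vget, if_neg hnn, if_neg hnn]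
  · unfold tt
    have h5 := sum_map_set (fun r => r.countP (fun c => c)) v xn hxv ((v[xn]).set yn true)
    have hcnt := countP_set_true (v[xn]) yn (by omega) hcell
    simp only at h5
    omega
  · unfold tf
    have h5 := sum_map_set (fun r => r.countP (fun c => !c)) v xn hxv ((v[xn]).set yn true)
    have hcnt := countP_set_false (v[xn]) yn (by omega) hcell
    simp only at h5
    omega


-- ---- guard and push-list characterisations ----
lemma nrm_cast_of_nonneg (n : Nat) (i : Int) (h : 0 ≤ i) (h2 : i < n) : ((nrm n i : Nat) : Int) = i := by
  unfold nrm; split_ifs <;> omega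

lemma guard_iff (m : List (List Int)) (v : List (List Bool)) (hrect : rect m) (hv : shapeOK m v)
    (n : Int × Int) :
    dfsGuard m v n = true ↔ (inB m n ∧ mget m n.1 n.2 = 1 ∧ vget v n.1 n.2 = false) := by
  by_cases hb : inB m n
  · have h1 := pget2_m m hrect n hb
    have h2 := pget2_v m v hv n hb
    obtain ⟨a1, a2, a3, a4⟩ := hb
    have a4' : n.2 < ((m.headD []).length : Int) := a4
    unfold dfsGuard
    simp only [h1, h2, Option.getD_some, Bool.and_eq_true, decide_eq_true_eq, beq_iff_eq,
      Bool.not_eq_true']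
    simp only [inB, colsN]
    constructor
    · rintro ⟨⟨⟨⟨⟨p1, p2⟩, p3⟩, p4⟩, p5⟩, p6⟩
      exact ⟨⟨p1, p2, p3, p4⟩, p5, p6⟩
    · rintro ⟨⟨p1, p2, p3, p4⟩, p5, p6⟩
      exact ⟨⟨⟨⟨⟨p1, p2⟩, p3⟩, p4⟩, p5⟩, p6⟩
  · have hb' : ¬ (0 ≤ n.1 ∧ n.1 < (m.length : Int) ∧ 0 ≤ n.2 ∧ n.2 < ((m.headD []).length : Int)) := by
      simpa [inB, colsN] using hb
    constructor
    · intro h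
      unfold dfsGuard at h
      simp only [Bool.and_eq_true, decide_eq_true_eq] at h
      exact absurd ⟨h.1.1.1.1.1, h.1.1.1.1.2, h.1.1.1.2, h.1.1.2⟩ hb'
    · rintro ⟨hbb, -, -⟩
      exact absurd (by simpa [inB, colsN] using hbb) hb'

lemma altGuard_eq (m : List (List Int)) (v : List (List Bool)) (n : Int × Int) :
    altGuard m v n = dfsGuard m v n := rfl

lemma dfsPushes_eq (m : List (List Int)) (v : List (List Bool)) (c : Int × Int) :
    dfsPushes m v c = (dirsA.filter (fun d => dfsGuard m v (c.1 + d.1, c.2 + d.2))).map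
      (fun d => (c.1 + d.1, c.2 + d.2)) := by
  unfold dfsPushes
  rw [PySem.List.foldl_append_if (fun d => dfsGuard m v (c.1 + d.1, c.2 + d.2))
    (fun d => (c.1 + d.1, c.2 + d.2)) dirsA []]
  simp

lemma mem_dfsPushes (m : List (List Int)) (v : List (List Bool)) (c n : Int × Int) :
    n ∈ dfsPushes m v c ↔ ∃ d ∈ dirsA, dfsGuard m v (c.1 + d.1, c.2 + d.2) = true ∧ n = (c.1 + d.1, c.2 + d.2) := by
  rw [dfsPushes_eq]
  simp only [List.mem_map, List.mem_filter]
  constructor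
  · rintro ⟨d, ⟨hd, hg⟩, rfl⟩; exact ⟨d, hd, hg, rfl⟩
  · rintro ⟨d, hd, hg, rfl⟩; exact ⟨d, ⟨hd, hg⟩, rfl⟩

lemma length_dfsPushes (m : List (List Int)) (v : List (List Bool)) (c : Int × Int) :
    (dfsPushes m v c).length ≤ 8 := by
  rw [dfsPushes_eq, List.length_map]
  have := List.length_filter_le (fun d => dfsGuard m v (c.1 + d.1, c.2 + d.2)) dirsA
  simpa [dirsA] using this

lemma altPushes_eq (m : List (List Int)) (v : List (List Bool)) (c : Int × Int) :
    dirsB.foldl (fun acc d => if altGuard m v (c.1 + d.1, c.2 + d.2) then acc ++ [(c.1 + d.1, c.2 + d.2)] else acc) [] =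
    (dirsB.filter (fun d => dfsGuard m v (c.1 + d.1, c.2 + d.2))).map (fun d => (c.1 + d.1, c.2 + d.2)) := by
  rw [PySem.List.foldl_append_if (fun d => altGuard m v (c.1 + d.1, c.2 + d.2))
    (fun d => (c.1 + d.1, c.2 + d.2)) dirsB []]
  simp [altGuard_eq]

lemma mem_dirsB_dirsA (d : Int × Int) : d ∈ dirsB ↔ d ∈ dirsA := by
  unfold dirsA dirsB; constructor <;> intro h <;> fin_cases h <;> decide

-- ---- Reach facts ----
lemma Reach_elig (m : List (List Int)) (b : List (List Bool)) (S : List (Int × Int))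
    (hS : ∀ c ∈ S, elig m b c) : ∀ c, Reach m b S c → elig m b c := by
  intro c h
  induction h with
  | seed c hc => exact hS c hc
  | step u w hu ha he ih => exact he

lemma visited_ext (m : List (List Int)) (v w : List (List Bool)) (hv : shapeOK m v) (hw : shapeOK m w)
    (h : ∀ i j : Int, vget v i j = vget w i j) : v = w := by
  obtain ⟨hvl, hvr⟩ := hv
  obtain ⟨hwl, hwr⟩ := hw
  apply List.ext_getElem (by omega)
  intro n h1 h2
  have hrv : (v[n]).length = colsN m := hvr _ (List.getElem_mem h1)
  have hrw : (w[n]).length = colsN m := hwr _ (List.getElem_mem h2)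
  apply List.ext_getElem (by omega)
  intro k k1 k2
  have hk := h (n : Int) (k : Int)
  rw [vget_eq_getD _ _ _ (by positivity) (by positivity),
      vget_eq_getD _ _ _ (by positivity) (by positivity)] at hk
  simp only [Int.toNat_natCast] at hk
  rwa [getD_eq_getElem' _ [] h1, getD_eq_getElem' _ [] h2,
      getD_eq_getElem' _ false (by omega), getD_eq_getElem' _ false (by omega)] at hk

-- ---- the two loop invariants: each loop computes the closure of its seed set ----
lemma dfsLoop_char (m : List (List Int)) (b : List (List Bool)) (S0 : List (Int × Int))
    (hrect : rect m) (hS0 : ∀ c ∈ S0, elig m b c) :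
    ∀ (fuel : Nat) (st : List (Int × Int)) (v : List (List Bool)) (a : Int),
    9 * tf v + st.length < fuel →
    shapeOK m v →
    (∀ i j, vget b i j = true → vget v i j = true) →
    (∀ i j, vget v i j = true → vget b i j = true ∨ Reach m b S0 (i, j)) →
    (∀ c ∈ st, elig m b c ∧ Reach m b S0 c) →
    (∀ u : Int × Int, vget v u.1 u.2 = true → vget b u.1 u.2 = false →
       ∀ w, adj u w → elig m b w → vget v w.1 w.2 = true ∨ w ∈ st) →
    (∀ s ∈ S0, vget v s.1 s.2 = true ∨ s ∈ st) →
    shapeOK m (dfsLoop m fuel st v a).2 ∧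
    (∀ i j, vget (dfsLoop m fuel st v a).2 i j = true ↔ (vget b i j = true ∨ Reach m b S0 (i, j))) ∧
    (dfsLoop m fuel st v a).1 = a + ((tt (dfsLoop m fuel st v a).2 : Int) - (tt v : Int)) := by
  intro fuel
  induction fuel with
  | zero => intro st v a hfuel; omega
  | succ f ih =>
    intro st v a hfuel hsh hI0 hI2 hI1 hI3 hI4
    match st with
    | [] =>
      simp only [dfsLoop]
      refine ⟨hsh, ?_, by omega⟩
      intro i j
      constructor
      · exact hI2 i j
      · rintro (hb | hre)
        · exact hI0 i j hb
        · have key : ∀ c, Reach m b S0 c → vget v c.1 c.2 = true := by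
            intro c hc
            induction hc with
            | seed c hc =>
              rcases hI4 c hc with h | h
              · exact h
              · simp at h
            | step u w hu ha he ihc =>
              have heu := Reach_elig m b S0 hS0 u hu
              rcases hI3 u ihc heu.2.2 w ha he with h | h
              · exact h
              · simp at h
          exact key (i, j) hre
    | c :: rest =>
      have hce := hI1 c List.mem_cons_self
      have hget := pget2_v m v hsh c hce.1.1
      cases hvc : vget v c.1 c.2 with
      | true =>
        simp only [dfsLoop, hget, hvc]
        apply ih rest v a (by simp at hfuel; omega) hsh hI0 hI2
          (fun c' hc' => hI1 c' (List.mem_cons_of_mem _ hc'))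
        · intro u hu1 hu2 w ha he
          rcases hI3 u hu1 hu2 w ha he with h | h
          · exact Or.inl h
          · rcases List.mem_cons.mp h with rfl | hmem
            · exact Or.inl hvc
            · exact Or.inr hmem
        · intro s hs
          rcases hI4 s hs with h | h
          · exact Or.inl h
          · rcases List.mem_cons.mp h with rfl | hmem
            · exact Or.inl hvc
            · exact Or.inr hmem
      | false =>
        obtain ⟨⟨b1, b2, b3, b4⟩, hmg, hvb⟩ := hce.1
        have hn1 : ((nrm m.length c.1 : Nat) : Int) = c.1 := nrm_cast_of_nonneg _ _ b1 (by omega)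
        have hn2 : ((nrm (colsN m) c.2 : Nat) : Int) = c.2 := nrm_cast_of_nonneg _ _ b3 (by omega)
        obtain ⟨hsh', hchar, htt, htf⟩ :=
          pset2_char m v hsh c.1 c.2 (by omega) b2 (by omega) b4 (by rw [hn1, hn2]; exact hvc)
        have hchar' : ∀ i j : Int, vget (pset2 v c.1 c.2 true) i j =
            (if i = c.1 ∧ j = c.2 then true else vget v i j) := by
          intro i j; rw [hchar i j, hn1, hn2]
        have hmono : ∀ i j : Int, vget v i j = true → vget (pset2 v c.1 c.2 true) i j = true := by
          intro i j h
          rw [hchar']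
          split_ifs <;> simp [h]
        have hvc' : vget (pset2 v c.1 c.2 true) c.1 c.2 = true := by
          rw [hchar']; simp
        have hp8 := length_dfsPushes m (pset2 v c.1 c.2 true) c
        have hmem_push : ∀ n, n ∈ dfsPushes m (pset2 v c.1 c.2 true) c →
            elig m b n ∧ Reach m b S0 n := by
          intro n hn
          rcases (mem_dfsPushes _ _ _ _).mp hn with ⟨d, hd, hg, rfl⟩
          rcases (guard_iff m _ hrect hsh' _).mp hg with ⟨g1, g2, g3⟩
          have hbn : vget b (c.1 + d.1) (c.2 + d.2) = false := by
            by_contra hbt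
            have := hmono _ _ (hI0 _ _ (by simpa using hbt))
            rw [this] at g3; exact absurd g3 (by simp)
          exact ⟨⟨g1, g2, hbn⟩, Reach.step c _ hce.2 ⟨d, hd, rfl⟩ ⟨g1, g2, hbn⟩⟩
        simp only [dfsLoop, hget, hvc]
        have hrec := ih ((dfsPushes m (pset2 v c.1 c.2 true) c).reverse ++ rest)
          (pset2 v c.1 c.2 true) (a + 1)
          (by simp only [List.length_append, List.length_reverse]; simp at hfuel; omega)
          hsh'
          (fun i j hb => hmono i j (hI0 i j hb))
          (by
            intro i j hv't
            rw [hchar'] at hv't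
            split_ifs at hv't with hij
            · obtain ⟨hi, hj⟩ := hij
              right; rw [hi, hj]; exact hce.2
            · exact hI2 i j hv't)
          (by
            intro c' hc'
            rcases List.mem_append.mp hc' with h | h
            · exact hmem_push c' (List.mem_reverse.mp h)
            · exact hI1 c' (List.mem_cons_of_mem _ h))
          (by
            intro u hu1 hu2 w ha he
            by_cases hold : vget v u.1 u.2 = true
            · rcases hI3 u hold hu2 w ha he with h | h
              · exact Or.inl (hmono _ _ h)
              · rcases List.mem_cons.mp h with rfl | hmem
                · exact Or.inl hvc'
                · exact Or.inr (List.mem_append.mpr (Or.inr hmem))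
            · rw [hchar'] at hu1
              split_ifs at hu1 with hij
              · obtain ⟨hu1', hu2'⟩ := hij
                by_cases hvw : vget (pset2 v c.1 c.2 true) w.1 w.2 = true
                · exact Or.inl hvw
                · right
                  apply List.mem_append.mpr
                  left
                  apply List.mem_reverse.mpr
                  obtain ⟨d, hd, hw⟩ := ha
                  apply (mem_dfsPushes _ _ _ _).mpr
                  have hww : w = (c.1 + d.1, c.2 + d.2) := by rw [hw, hu1', hu2']
                  refine ⟨d, hd, ?_, hww⟩
                  apply (guard_iff m _ hrect hsh' _).mpr
                  rw [← hww]
                  exact ⟨he.1, he.2.1, Bool.eq_false_iff.mpr hvw⟩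
              · exact absurd hu1 hold)
          (by
            intro s hs
            rcases hI4 s hs with h | h
            · exact Or.inl (hmono _ _ h)
            · rcases List.mem_cons.mp h with rfl | hmem
              · exact Or.inl hvc'
              · exact Or.inr (List.mem_append.mpr (Or.inr hmem)))
        refine ⟨hrec.1, hrec.2.1, ?_⟩
        rw [hrec.2.2]
        omega

lemma altLoop_char (m : List (List Int)) (b : List (List Bool)) (S0 : List (Int × Int))
    (hrect : rect m) (hS0 : ∀ c ∈ S0, elig m b c) :
    ∀ (fuel : Nat) (i : Nat) (q : List (Int × Int)) (v : List (List Bool)) (a : Int),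
    9 * tf v + (q.length - i) < fuel →
    shapeOK m v →
    (∀ i' j', vget b i' j' = true → vget v i' j' = true) →
    (∀ i' j', vget v i' j' = true → vget b i' j' = true ∨ Reach m b S0 (i', j')) →
    (∀ c ∈ q.drop i, elig m b c ∧ Reach m b S0 c) →
    (∀ u : Int × Int, vget v u.1 u.2 = true → vget b u.1 u.2 = false →
       ∀ w, adj u w → elig m b w → vget v w.1 w.2 = true ∨ w ∈ q.drop i) →
    (∀ s ∈ S0, vget v s.1 s.2 = true ∨ s ∈ q.drop i) →
    shapeOK m (altLoop m fuel i q v a).2 ∧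
    (∀ i' j', vget (altLoop m fuel i q v a).2 i' j' = true ↔ (vget b i' j' = true ∨ Reach m b S0 (i', j'))) ∧
    (altLoop m fuel i q v a).1 = a + ((tt (altLoop m fuel i q v a).2 : Int) - (tt v : Int)) := by
  intro fuel
  induction fuel with
  | zero => intro i q v a hfuel; omega
  | succ f ih =>
    intro i q v a hfuel hsh hI0 hI2 hI1 hI3 hI4
    by_cases hlt : i < q.length
    · have hpend : q.drop i = q[i] :: q.drop (i + 1) := List.drop_eq_getElem_cons hlt
      have hce := hI1 q[i] (by rw [hpend]; exact List.mem_cons_self)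
      have hget := pget2_v m v hsh q[i] hce.1.1
      rw [hpend] at hI1 hI3 hI4
      cases hvc : vget v q[i].1 q[i].2 with
      | true =>
        simp only [altLoop, dif_pos hlt, hget, hvc]
        apply ih (i + 1) q v a (by omega) hsh hI0 hI2
          (fun c' hc' => hI1 c' (List.mem_cons_of_mem _ hc'))
        · intro u hu1 hu2 w ha he
          rcases hI3 u hu1 hu2 w ha he with h | h
          · exact Or.inl h
          · rcases List.mem_cons.mp h with rfl | hmem
            · exact Or.inl hvc
            · exact Or.inr hmem
        · intro s hs
          rcases hI4 s hs with h | h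
          · exact Or.inl h
          · rcases List.mem_cons.mp h with rfl | hmem
            · exact Or.inl hvc
            · exact Or.inr hmem
      | false =>
        obtain ⟨⟨b1, b2, b3, b4⟩, hmg, hvb⟩ := hce.1
        have hn1 : ((nrm m.length q[i].1 : Nat) : Int) = q[i].1 := nrm_cast_of_nonneg _ _ b1 (by omega)
        have hn2 : ((nrm (colsN m) q[i].2 : Nat) : Int) = q[i].2 := nrm_cast_of_nonneg _ _ b3 (by omega)
        obtain ⟨hsh', hchar, htt, htf⟩ :=
          pset2_char m v hsh q[i].1 q[i].2 (by omega) b2 (by omega) b4 (by rw [hn1, hn2]; exact hvc)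
        have hchar' : ∀ i' j' : Int, vget (pset2 v q[i].1 q[i].2 true) i' j' =
            (if i' = q[i].1 ∧ j' = q[i].2 then true else vget v i' j') := by
          intro i' j'; rw [hchar i' j', hn1, hn2]
        have hmono : ∀ i' j' : Int, vget v i' j' = true → vget (pset2 v q[i].1 q[i].2 true) i' j' = true := by
          intro i' j' h
          rw [hchar']
          split_ifs <;> simp [h]
        have hvc' : vget (pset2 v q[i].1 q[i].2 true) q[i].1 q[i].2 = true := by
          rw [hchar']; simp
        have hpush := altPushes_eq m (pset2 v q[i].1 q[i].2 true) q[i]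
        have hmem_push : ∀ n, n ∈ (dirsB.filter (fun d => dfsGuard m (pset2 v q[i].1 q[i].2 true) (q[i].1 + d.1, q[i].2 + d.2))).map (fun d => (q[i].1 + d.1, q[i].2 + d.2)) →
            elig m b n ∧ Reach m b S0 n := by
          intro n hn
          simp only [List.mem_map, List.mem_filter] at hn
          obtain ⟨d, ⟨hd, hg⟩, rfl⟩ := hn
          rcases (guard_iff m _ hrect hsh' _).mp hg with ⟨g1, g2, g3⟩
          have hbn : vget b (q[i].1 + d.1) (q[i].2 + d.2) = false := by
            by_contra hbt
            have := hmono _ _ (hI0 _ _ (by simpa using hbt))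
            rw [this] at g3; exact absurd g3 (by simp)
          exact ⟨⟨g1, g2, hbn⟩,
            Reach.step q[i] _ hce.2 ⟨d, (mem_dirsB_dirsA d).mp hd, rfl⟩ ⟨g1, g2, hbn⟩⟩
        have hplen : ((dirsB.filter (fun d => dfsGuard m (pset2 v q[i].1 q[i].2 true) (q[i].1 + d.1, q[i].2 + d.2))).map (fun d => (q[i].1 + d.1, q[i].2 + d.2))).length ≤ 8 := by
          rw [List.length_map]
          have := List.length_filter_le (fun d => dfsGuard m (pset2 v q[i].1 q[i].2 true) (q[i].1 + d.1, q[i].2 + d.2)) dirsB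
          simpa [dirsB] using this
        have hdrop : ∀ ps : List (Int × Int), (q ++ ps).drop (i + 1) = q.drop (i + 1) ++ ps :=
          fun ps => List.drop_append_of_le_length (by omega)
        simp only [altLoop, dif_pos hlt, hget, hvc, hpush]
        have hrec := ih (i + 1)
          (q ++ (dirsB.filter (fun d => dfsGuard m (pset2 v q[i].1 q[i].2 true) (q[i].1 + d.1, q[i].2 + d.2))).map (fun d => (q[i].1 + d.1, q[i].2 + d.2)))
          (pset2 v q[i].1 q[i].2 true) (a + 1)
          (by simp only [List.length_append]; omega)
          hsh'
          (fun i' j' hb => hmono i' j' (hI0 i' j' hb))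
          (by
            intro i' j' hv't
            rw [hchar'] at hv't
            split_ifs at hv't with hij
            · obtain ⟨hi', hj'⟩ := hij
              right; rw [hi', hj']; exact hce.2
            · exact hI2 i' j' hv't)
          (by
            intro c' hc'
            rw [hdrop] at hc'
            rcases List.mem_append.mp hc' with h | h
            · exact hI1 c' (List.mem_cons_of_mem _ h)
            · exact hmem_push c' h)
          (by
            intro u hu1 hu2 w ha he
            rw [hdrop]
            by_cases hold : vget v u.1 u.2 = true
            · rcases hI3 u hold hu2 w ha he with h | h
              · exact Or.inl (hmono _ _ h)
              · rcases List.mem_cons.mp h with rfl | hmem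
                · exact Or.inl hvc'
                · exact Or.inr (List.mem_append.mpr (Or.inl hmem))
            · rw [hchar'] at hu1
              split_ifs at hu1 with hij
              · obtain ⟨hu1', hu2'⟩ := hij
                by_cases hvw : vget (pset2 v q[i].1 q[i].2 true) w.1 w.2 = true
                · exact Or.inl hvw
                · right
                  apply List.mem_append.mpr
                  right
                  obtain ⟨d, hd, hw⟩ := ha
                  simp only [List.mem_map, List.mem_filter]
                  have hww : w = (q[i].1 + d.1, q[i].2 + d.2) := by rw [hw, hu1', hu2']
                  refine ⟨d, ⟨(mem_dirsB_dirsA d).mpr hd, ?_⟩, hww.symm⟩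
                  apply (guard_iff m _ hrect hsh' _).mpr
                  rw [← hww]
                  exact ⟨he.1, he.2.1, Bool.eq_false_iff.mpr hvw⟩
              · exact absurd hu1 hold)
          (by
            intro s hs
            rw [hdrop]
            rcases hI4 s hs with h | h
            · exact Or.inl (hmono _ _ h)
            · rcases List.mem_cons.mp h with rfl | hmem
              · exact Or.inl hvc'
              · exact Or.inr (List.mem_append.mpr (Or.inl hmem)))
        refine ⟨hrec.1, hrec.2.1, ?_⟩
        rw [hrec.2.2]
        omega
    · have hpend : q.drop i = [] := List.drop_eq_nil_of_le (by omega)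
      rw [hpend] at hI1 hI3 hI4
      simp only [altLoop, dif_neg hlt]
      refine ⟨hsh, ?_, by omega⟩
      intro i' j'
      constructor
      · exact hI2 i' j'
      · rintro (hb | hre)
        · exact hI0 i' j' hb
        · have key : ∀ c, Reach m b S0 c → vget v c.1 c.2 = true := by
            intro c hc
            induction hc with
            | seed c hc =>
              rcases hI4 c hc with h | h
              · exact h
              · simp at h
            | step u w hu ha he ihc =>
              have heu := Reach_elig m b S0 hS0 u hu
              rcases hI3 u ihc heu.2.2 w ha he with h | h
              · exact h
              · simp at h
          exact key (i', j') hre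

-- ---- single-step unfolding equations for the two loops ----
lemma dfsLoop_nil (m : List (List Int)) (f : Nat) (v : List (List Bool)) (a : Int) :
    dfsLoop m (f + 1) [] v a = (a, v) := by simp only [dfsLoop]

lemma dfsLoop_cons_true (m : List (List Int)) (f : Nat) (c : Int × Int) (rest : List (Int × Int))
    (v : List (List Bool)) (a : Int) (hg : pget2? v c.1 c.2 = some true) :
    dfsLoop m (f + 1) (c :: rest) v a = dfsLoop m f rest v a := by
  simp only [dfsLoop, hg]

lemma dfsLoop_cons_false (m : List (List Int)) (f : Nat) (c : Int × Int) (rest : List (Int × Int))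
    (v : List (List Bool)) (a : Int) (hg : pget2? v c.1 c.2 = some false) :
    dfsLoop m (f + 1) (c :: rest) v a =
    dfsLoop m f ((dfsPushes m (pset2 v c.1 c.2 true) c).reverse ++ rest) (pset2 v c.1 c.2 true) (a + 1) := by
  simp only [dfsLoop, hg]

lemma altLoop_step_true (m : List (List Int)) (f i : Nat) (q : List (Int × Int))
    (v : List (List Bool)) (a : Int) (h : i < q.length) (hg : pget2? v q[i].1 q[i].2 = some true) :
    altLoop m (f + 1) i q v a = altLoop m f (i + 1) q v a := by
  simp only [altLoop, dif_pos h, hg]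

lemma altLoop_step_false (m : List (List Int)) (f i : Nat) (q : List (Int × Int))
    (v : List (List Bool)) (a : Int) (h : i < q.length) (hg : pget2? v q[i].1 q[i].2 = some false) :
    altLoop m (f + 1) i q v a = altLoop m f (i + 1)
      (q ++ (dirsB.filter (fun d => dfsGuard m (pset2 v q[i].1 q[i].2 true) (q[i].1 + d.1, q[i].2 + d.2))).map
        (fun d => (q[i].1 + d.1, q[i].2 + d.2)))
      (pset2 v q[i].1 q[i].2 true) (a + 1) := by
  simp only [altLoop, dif_pos h, hg, altPushes_eq]

lemma altLoop_done (m : List (List Int)) (f i : Nat) (q : List (Int × Int))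
    (v : List (List Bool)) (a : Int) (h : ¬ i < q.length) :
    altLoop m (f + 1) i q v a = (a, v) := by
  simp only [altLoop, dif_neg h]

-- ===== VERDICT (by name: the statement is the Claim_ definition above) =====
theorem dfs_spec : Claim_equal_dfs := by
  intro matrix x y visited hdom hpre
  unfold Spec_dfs
  obtain ⟨hne, hrect0, hvl, hvr, hx1, hx2, hy1, hy2⟩ := hpre
  have hrect : rect matrix := hrect0
  have hsh : shapeOK matrix visited := ⟨hvl, hvr⟩
  have hy1' : -(colsN matrix : Int) ≤ y := hy1
  have hy2' : y < (colsN matrix : Int) := hy2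
  have hget := pget2_v_wrap matrix visited hsh x y hx1 hx2 hy1' hy2'
  unfold dfs dfs_alt
  have e : 9 * tf visited + 2 = (9 * tf visited + 1) + 1 := rfl
  rw [e]
  have h01 : (0 : Nat) < [(x, y)].length := by simp
  cases hvis : vget visited ((nrm matrix.length x : Nat) : Int) ((nrm (colsN matrix) y : Nat) : Int) with
  | true =>
    have hg : pget2? visited x y = some true := by rw [hget, hvis]
    rw [dfsLoop_cons_true matrix _ _ _ _ _ hg,
        altLoop_step_true matrix _ _ _ _ _ h01 (by simpa using hg)]
    have e1 : 9 * tf visited + 1 = (9 * tf visited) + 1 := rfl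
    rw [e1, dfsLoop_nil, altLoop_done matrix _ _ _ _ _ (by simp)]
  | false =>
    have hg : pget2? visited x y = some false := by rw [hget, hvis]
    rw [dfsLoop_cons_false matrix _ _ _ _ _ hg,
        altLoop_step_false matrix _ _ _ _ _ h01 (by simpa using hg)]
    simp only [List.getElem_cons_zero, List.singleton_append]
    obtain ⟨hsh1, hchar1, htt1, htf1⟩ := pset2_char matrix visited hsh x y hx1 hx2 hy1' hy2' hvis
    have hS0 : ∀ c ∈ dfsPushes matrix (pset2 visited x y true) (x, y),
        elig matrix (pset2 visited x y true) c := by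
      intro c hc
      rcases (mem_dfsPushes _ _ _ _).mp hc with ⟨d, hd, hgd, rfl⟩
      exact (guard_iff matrix _ hrect hsh1 _).mp hgd
    have hp8 := length_dfsPushes matrix (pset2 visited x y true) (x, y)
    have hA := dfsLoop_char matrix (pset2 visited x y true)
      (dfsPushes matrix (pset2 visited x y true) (x, y)) hrect hS0
      (9 * tf visited + 1)
      ((dfsPushes matrix (pset2 visited x y true) (x, y)).reverse ++ [])
      (pset2 visited x y true) (0 + 1)
      (by simp only [List.length_append, List.length_reverse, List.length_nil]; omega)
      hsh1
      (fun i j h => h)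
      (fun i j h => Or.inl h)
      (by
        intro c' hc'
        simp only [List.append_nil, List.mem_reverse] at hc'
        exact ⟨hS0 c' hc', Reach.seed c' hc'⟩)
      (by
        intro u hu1 hu2
        rw [hu1] at hu2
        simp at hu2)
      (by
        intro s hs
        exact Or.inr (by simpa using hs))
    have hB := altLoop_char matrix (pset2 visited x y true)
      (dfsPushes matrix (pset2 visited x y true) (x, y)) hrect hS0
      (9 * tf visited + 1) (0 + 1)
      ((x, y) :: (dirsB.filter (fun d => dfsGuard matrix (pset2 visited x y true) (x + d.1, y + d.2))).map (fun d => (x + d.1, y + d.2)))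
      (pset2 visited x y true) (0 + 1)
      (by
        have hlen := List.length_filter_le (fun d => dfsGuard matrix (pset2 visited x y true) (x + d.1, y + d.2)) dirsB
        have h8 : dirsB.length = 8 := rfl
        simp only [List.length_cons, List.length_map]
        omega)
      hsh1
      (fun i j h => h)
      (fun i j h => Or.inl h)
      (by
        intro c' hc'
        simp only [List.drop_succ_cons, List.drop_zero, List.mem_map, List.mem_filter] at hc'
        obtain ⟨d, ⟨hd, hgd⟩, rfl⟩ := hc'
        have hmem : (x + d.1, y + d.2) ∈ dfsPushes matrix (pset2 visited x y true) (x, y) :=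
          (mem_dfsPushes _ _ _ _).mpr ⟨d, (mem_dirsB_dirsA d).mp hd, hgd, rfl⟩
        exact ⟨hS0 _ hmem, Reach.seed _ hmem⟩)
      (by
        intro u hu1 hu2
        rw [hu1] at hu2
        simp at hu2)
      (by
        intro s hs
        right
        simp only [List.drop_succ_cons, List.drop_zero]
        rcases (mem_dfsPushes _ _ _ _).mp hs with ⟨d, hd, hgd, rfl⟩
        simp only [List.mem_map, List.mem_filter]
        exact ⟨d, ⟨(mem_dirsB_dirsA d).mpr hd, hgd⟩, rfl⟩)
    obtain ⟨hshA, hcharA, hareaA⟩ := hA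
    obtain ⟨hshB, hcharB, hareaB⟩ := hB
    have hveq : (dfsLoop matrix (9 * tf visited + 1)
        ((dfsPushes matrix (pset2 visited x y true) (x, y)).reverse ++ [])
        (pset2 visited x y true) (0 + 1)).2 =
        (altLoop matrix (9 * tf visited + 1) (0 + 1)
        ((x, y) :: (dirsB.filter (fun d => dfsGuard matrix (pset2 visited x y true) (x + d.1, y + d.2))).map (fun d => (x + d.1, y + d.2)))
        (pset2 visited x y true) (0 + 1)).2 := by
      apply visited_ext matrix _ _ hshA hshB
      intro i j
      have h1 := hcharA i j
      have h2 := hcharB i j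
      by_cases hP : vget (pset2 visited x y true) i j = true ∨
          Reach matrix (pset2 visited x y true)
            (dfsPushes matrix (pset2 visited x y true) (x, y)) (i, j)
      · rw [h1.mpr hP, h2.mpr hP]
      · have g1 : ¬ _ = true := fun h => hP (h1.mp h)
        have g2 : ¬ _ = true := fun h => hP (h2.mp h)
        rw [Bool.eq_false_iff.mpr g1, Bool.eq_false_iff.mpr g2]
    rw [hareaA, hareaB, hveq]
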